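-- pv_equiv track=rewrite | github.com/sagebei/Impartial-Games-a-Challenge-for-Reinforcement-Learning | example/NimEnvironments.py | state_to_position
-- ===== SOURCE A (Python) =====
-- def state_to_position(state):
--     position = []
--     heap = 0
--     for s in state:
--         if s == -1:
--             position.append(int(heap))
--             heap = 0
--         else:
--             heap += s
--     position.append(int(heap))
--     return position
-- ===== SOURCE B (Python) =====
-- def _split_at_markers(xs):
--     if -1 in xs:
--         i = xs.index(-1)
--         return [xs[:i]] + _split_at_markers(xs[i + 1:])
--     return [xs]
--
--
-- def state_to_position(state):
--     return [sum(seg) for seg in _split_at_markers(state)]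
-- ===== Notes on version B (the rewrite author's own statement) =====
-- stated objective: alternative
-- what changed: Replaces the single accumulator loop by a recursive split of the state into segments at each -1 marker followed by a separate map-sum pass over the materialized segments.
import Mathlib
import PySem

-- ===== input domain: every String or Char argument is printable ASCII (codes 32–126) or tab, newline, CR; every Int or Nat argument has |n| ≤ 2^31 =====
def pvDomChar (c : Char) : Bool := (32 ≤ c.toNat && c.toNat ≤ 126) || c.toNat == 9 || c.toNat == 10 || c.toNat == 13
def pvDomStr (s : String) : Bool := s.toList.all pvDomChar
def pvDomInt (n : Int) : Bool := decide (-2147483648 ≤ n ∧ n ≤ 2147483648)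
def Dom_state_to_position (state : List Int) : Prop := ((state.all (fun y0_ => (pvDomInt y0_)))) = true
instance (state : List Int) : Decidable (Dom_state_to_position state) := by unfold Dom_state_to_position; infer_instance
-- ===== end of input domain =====

-- B splits the state into segments at each -1 marker and maps sum over them; alternative decomposition, same cost.

-- ===== PORT A =====
def state_to_position (state : List Int) : List Int :=
  let ph := state.foldl
    (fun (ph : List Int × Int) s =>
      if s == -1 then (ph.1 ++ [ph.2], 0) else (ph.1, ph.2 + s))
    ([], 0)
  ph.1 ++ [ph.2]

-- ===== PORT B =====
def splitAtMarkers (xs : List Int) : List (List Int) :=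
  if h : (-1 : Int) ∈ xs then
    (xs.take (xs.idxOf (-1))) :: splitAtMarkers (xs.drop (xs.idxOf (-1) + 1))
  else [xs]
termination_by xs.length
decreasing_by
  have := List.idxOf_lt_length_of_mem h
  simp [List.length_drop]; omega

def state_to_position_alt (state : List Int) : List Int :=
  (splitAtMarkers state).map (fun seg => seg.sum)

-- ===== PRECONDITION & SPEC =====
def Spec_state_to_position (state : List Int) (out : List Int) : Prop := out = state_to_position_alt state
instance (state : List Int) (out : List Int) : Decidable (Spec_state_to_position state out) := by unfold Spec_state_to_position; infer_instance

-- ===== CLAIM (what is proved, stated in full; the proofs are below) =====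
def Claim_equal_state_to_position : Prop := ∀ (state : List Int), Dom_state_to_position state → Spec_state_to_position state (state_to_position state)

-- ===== LEMMAS AND PROOFS =====

def aStep (ph : List Int × Int) (s : Int) : List Int × Int :=
  if s == -1 then (ph.1 ++ [ph.2], 0) else (ph.1, ph.2 + s)

theorem aFold_shift (xs : List Int) (pos : List Int) (heap : Int) :
    xs.foldl aStep (pos, heap) =
      (pos ++ (xs.foldl aStep ([], heap)).1, (xs.foldl aStep ([], heap)).2) := by
  induction xs generalizing pos heap with
  | nil => simp
  | cons x xs ih =>
    simp only [List.foldl_cons]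
    by_cases hx : x = -1
    · simp only [aStep, hx, beq_self_eq_true, if_true]
      rw [ih (pos ++ [heap]) 0, ih ([] ++ [heap]) 0]
      simp [List.append_assoc]
    · simp only [aStep, beq_iff_eq, if_neg hx]
      exact ih pos (heap + x)

theorem aFold_no_marker (xs : List Int) (heap : Int) (h : (-1 : Int) ∉ xs) :
    xs.foldl aStep ([], heap) = ([], heap + xs.sum) := by
  induction xs generalizing heap with
  | nil => simp
  | cons x xs ih =>
    simp only [List.mem_cons, not_or] at h
    simp only [List.foldl_cons, aStep, beq_iff_eq]
    rw [if_neg (fun hh => h.1 hh.symm), ih _ h.2]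
    simp [List.sum_cons]; ring

theorem state_to_position_eq_alt (xs : List Int) :
    state_to_position xs = state_to_position_alt xs := by
  induction hn : xs.length using Nat.strong_induction_on generalizing xs with
  | _ n ih =>
  subst hn
  by_cases h : (-1 : Int) ∈ xs
  · set i := xs.idxOf (-1) with hi
    have hlt : i < xs.length := List.idxOf_lt_length_of_mem h
    have hsplit : xs = xs.take i ++ (-1) :: xs.drop (i + 1) := by
      conv_lhs => rw [← List.take_append_drop i xs]
      congr 1
      rw [List.drop_eq_getElem_cons hlt]
      congr 1
      exact (List.getElem_idxOf hlt)
    have hnomem : (-1 : Int) ∉ xs.take i := by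
      intro hmem
      have := (List.mem_take_iff_idxOf_lt h).mp hmem
      omega
    have hkey : ∀ ys : List Int, state_to_position ys =
        (ys.foldl aStep ([], 0)).1 ++ [(ys.foldl aStep ([], 0)).2] := fun ys => rfl
    rw [hkey]
    conv_lhs => rw [hsplit]
    rw [List.foldl_append, aFold_no_marker _ _ hnomem, List.foldl_cons]
    have hstep : aStep ([], 0 + (xs.take i).sum) (-1) = ([0 + (xs.take i).sum], 0) := by
      simp [aStep]
    rw [hstep, aFold_shift]
    have hlen : (xs.drop (i + 1)).length < xs.length := by
      simp [List.length_drop]; omega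
    have ihd := ih (xs.drop (i + 1)).length hlen (xs.drop (i + 1)) rfl
    rw [hkey] at ihd
    unfold state_to_position_alt
    rw [splitAtMarkers, dif_pos h]
    simp only [List.map_cons, ← hi]
    have : ((List.foldl aStep ([], 0) (xs.drop (i + 1))).1 ++
        [(List.foldl aStep ([], 0) (xs.drop (i + 1))).2]) =
        (splitAtMarkers (xs.drop (i + 1))).map (fun seg => seg.sum) := by
      rw [ihd]; rfl
    simp only [List.append_assoc] at this ⊢
    simp [this]
  · have hkey : state_to_position xs =
        (xs.foldl aStep ([], 0)).1 ++ [(xs.foldl aStep ([], 0)).2] := rfl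
    rw [hkey, aFold_no_marker _ _ h]
    unfold state_to_position_alt
    rw [splitAtMarkers, dif_neg h]
    simp

-- ===== VERDICT (by name: the statement is the Claim_ definition above) =====
theorem state_to_position_spec : Claim_equal_state_to_position := by
  intro state _
  exact state_to_position_eq_alt state
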